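-- pv_equiv track=rewrite | github.com/aos/advent | day04/part_1.py | _find_guard
-- ===== SOURCE A (Python) =====
-- def _find_guard(cal):
--     t = {}
--     largest = 0
--     g = ''
--     for guard, times in cal.items():
--         if guard not in t:
--             t[guard] = 0
--
--         t[guard] = sum(times)
--
--     for guard, hours in t.items():
--         if hours > largest:
--             g = guard
--             largest = hours
--
--     return g
-- ===== SOURCE B (Python) =====
-- def _find_guard(cal):
--     ranked = sorted(((guard, sum(times)) for guard, times in cal.items()),
--                     key=lambda p: p[1], reverse=True)
--     if ranked and ranked[0][1] > 0:
--         return ranked[0][0]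
--     return ''
-- ===== Notes on version B (the rewrite author's own statement) =====
-- stated objective: alternative
-- what changed: Replaced A's dict-build-then-scan argmax with a sort-based algorithm: stably sort the (guard, total) pairs by total descending and take the head (or '' if its total is not positive); stability gives the same first-maximum tie-breaking.
import Mathlib
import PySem

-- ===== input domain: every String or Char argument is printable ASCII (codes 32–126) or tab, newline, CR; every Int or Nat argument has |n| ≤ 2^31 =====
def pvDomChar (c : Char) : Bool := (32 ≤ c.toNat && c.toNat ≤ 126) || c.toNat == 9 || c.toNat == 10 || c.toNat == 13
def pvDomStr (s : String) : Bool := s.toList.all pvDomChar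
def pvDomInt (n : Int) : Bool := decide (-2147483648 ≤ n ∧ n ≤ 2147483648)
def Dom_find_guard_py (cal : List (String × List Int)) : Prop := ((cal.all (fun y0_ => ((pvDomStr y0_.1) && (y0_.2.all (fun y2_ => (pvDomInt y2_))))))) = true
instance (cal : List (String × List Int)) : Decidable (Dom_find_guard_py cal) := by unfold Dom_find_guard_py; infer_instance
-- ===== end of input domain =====

-- B replaces A's dict-build-then-scan argmax with a stable descending sort of (guard, total) pairs, taking the head; equality about the return value only.


-- ===== PORT A =====
def find_guard_py (cal : List (String × List Int)) : String :=
  let t : PySem.Dict String Int :=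
    cal.foldl (fun t p =>
      let t := if t.contains p.1 = false then t.insert p.1 0 else t
      t.insert p.1 p.2.sum) PySem.Dict.empty
  let r : String × Int :=
    t.items.foldl (fun st q => if q.2 > st.2 then (q.1, q.2) else st) ("", 0)
  r.1

-- ===== PORT B =====
def find_guard_py_alt (cal : List (String × List Int)) : String :=
  let ranked := PySem.List.sorted (cal.map (fun p => (p.1, p.2.sum))) (fun p => p.2) true
  match ranked with
  | [] => ""
  | q :: _ => if q.2 > 0 then q.1 else ""

-- ===== PRECONDITION & SPEC =====
-- Pre_: cal is the association-list representation of a Python dict, whose keys are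
-- necessarily distinct; duplicate-key lists do not correspond to any Python input.
def Pre_find_guard_py (cal : List (String × List Int)) : Prop := (cal.map Prod.fst).Nodup
instance (cal : List (String × List Int)) : Decidable (Pre_find_guard_py cal) := by unfold Pre_find_guard_py; infer_instance
def pvWitness_find_guard_py : (List (String × List Int)) := [("a", [1, 2]), ("b", [3])]

def Spec_find_guard_py (cal : List (String × List Int)) (out : String) : Prop := out = find_guard_py_alt cal
instance (cal : List (String × List Int)) (out : String) : Decidable (Spec_find_guard_py cal out) := by unfold Spec_find_guard_py; infer_instance

-- ===== CLAIM =====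
def Claim_equal_find_guard_py : Prop := ∀ (cal : List (String × List Int)), Dom_find_guard_py cal → Pre_find_guard_py cal → Spec_find_guard_py cal (find_guard_py cal)

-- ===== LEMMAS AND PROOFS =====

-- A's loop body (conditionally seed with 0, then overwrite with the sum) is just one insert.
theorem stepA_eq_insert (t : PySem.Dict String Int) (p : String × List Int) :
    (let t' := if t.contains p.1 = false then t.insert p.1 0 else t
     t'.insert p.1 p.2.sum) = t.insert p.1 p.2.sum := by
  by_cases h : t.contains p.1 = false
  · simp [h, PySem.Dict.insert_insert_self]
  · simp [h]

-- With distinct keys, A's first loop builds exactly the per-entry sums, in order.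
theorem itemsA (cal : List (String × List Int)) (h : (cal.map Prod.fst).Nodup) :
    (cal.foldl (fun t p =>
      let t := if t.contains p.1 = false then t.insert p.1 0 else t
      t.insert p.1 p.2.sum) (PySem.Dict.empty : PySem.Dict String Int)).items
      = cal.map (fun p => (p.1, p.2.sum)) := by
  have hfun : (fun (t : PySem.Dict String Int) (p : String × List Int) =>
      let t := if t.contains p.1 = false then t.insert p.1 0 else t
      t.insert p.1 p.2.sum) = fun t p => t.insert p.1 p.2.sum := by
    funext t p
    exact stepA_eq_insert t p
  rw [hfun]
  rw [PySem.Dict.items_foldl_insert_fresh (k := Prod.fst) (v := fun p => p.2.sum)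
        (d := PySem.Dict.empty) (l := cal) (by intro a _; simp) h]
  simp [PySem.Dict.empty]

-- A's strict running-best step, named for the proofs below.
def bstep (st q : String × Int) : String × Int := if st.2 < q.2 then q else st

-- Inserting into a nonempty accumulator evolves the HEAD of the reverse-sorted list exactly
-- like A's strict running-best step; the sort's stability is captured by this head evolution.
theorem head_foldl_insertBy (l : List (String × Int)) :
    ∀ (h : String × Int) (tl : List (String × Int)),
      ∃ t, (l.foldl (fun acc q =>
              PySem.List.insertBy (fun a b => decide ((fun p : String × Int => p.2) b < (fun p : String × Int => p.2) a)) q acc)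
            (h :: tl))
        = (l.foldl bstep h) :: t := by
  induction l with
  | nil => intro h tl; exact ⟨tl, rfl⟩
  | cons q l ih =>
    intro h tl
    simp only [List.foldl_cons, PySem.List.insertBy, bstep]
    by_cases hq : h.2 < q.2
    · simpa [hq, bstep] using ih q (h :: tl)
    · simpa [hq, bstep] using ih h (PySem.List.insertBy (fun a b => decide (b.2 < a.2)) q tl)

-- Seeding A's strict running best with ("", 0) is a post-hoc positivity test on the pure best.
theorem foldl_zero_seed (r : List (String × Int)) :
    ∀ (a : String × Int),
      r.foldl bstep (if 0 < a.2 then a else ("", 0))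
        = (if 0 < (r.foldl bstep a).2 then r.foldl bstep a else ("", 0)) := by
  induction r with
  | nil => intro a; rfl
  | cons q r ih =>
    intro a
    simp only [List.foldl_cons]
    have hbz : bstep ("", 0) q = (if 0 < q.2 then q else ("", 0)) := by simp [bstep]
    by_cases ha : 0 < a.2
    · rw [if_pos ha]
      have hb : 0 < (bstep a q).2 := by
        simp only [bstep]; split_ifs with h
        · omega
        · exact ha
      have h1 := ih (bstep a q)
      rw [if_pos hb] at h1
      exact h1
    · rw [if_neg ha, hbz]
      by_cases hlt : a.2 < q.2
      · have e : bstep a q = q := by simp [bstep, hlt]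
        rw [e, ih q]
      · have e : bstep a q = a := by simp [bstep, hlt]
        have hq0 : ¬ (0 < q.2) := by omega
        rw [e, if_neg hq0]
        have h2 := ih a
        rw [if_neg ha] at h2
        exact h2

-- ===== VERDICT =====
theorem find_guard_py_spec : Claim_equal_find_guard_py := by
  intro cal _ hpre
  unfold Spec_find_guard_py find_guard_py find_guard_py_alt
  simp only [itemsA cal hpre]
  rw [PySem.List.sorted_rev_eq_foldl_insertBy]
  have hgt : (fun (st q : String × Int) => if q.2 > st.2 then (q.1, q.2) else st) = bstep := by
    funext st q; by_cases h : st.2 < q.2 <;> simp [h, bstep, gt_iff_lt]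
  simp only [hgt]
  cases hmap : cal.map (fun p => (p.1, p.2.sum)) with
  | nil => rfl
  | cons x r =>
    obtain ⟨t, ht⟩ := head_foldl_insertBy r x []
    simp only [List.foldl_cons]
    have hins : PySem.List.insertBy (fun a b => decide ((fun p : String × Int => p.2) b < (fun p : String × Int => p.2) a)) x ([] : List (String × Int)) = [x] := rfl
    rw [hins, ht]
    have hstep : bstep ("", 0) x = (if 0 < x.2 then x else ("", 0)) := by simp [bstep]
    rw [hstep, foldl_zero_seed r x]
    by_cases h : 0 < (r.foldl bstep x).2 <;> simp [h, gt_iff_lt]
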